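-- pv_equiv track=rewrite | github.com/oliverdougherC/Encoding_Database | client/main.py | _infer_family_for_encoder
-- ===== SOURCE A (Python) =====
-- from typing import Optional, Dict, Any, List, Tuple
--
-- HARDWARE_ENCODERS: Dict[str, List[Tuple[str, str]]] = {
--     # family -> list of (ffmpeg encoder name, friendly engine label)
--     "h264": [
--         ("h264_nvenc", "NVENC"),
--         ("h264_qsv", "Intel QSV"),
--         ("h264_amf", "AMD AMF"),
--         ("h264_videotoolbox", "VideoToolbox"),
--         ("h264_vaapi", "VAAPI"),
--         ("h264_v4l2m2m", "V4L2 M2M"),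
--         ("h264_omx", "OMX"),
--     ],
--     "hevc": [
--         ("hevc_nvenc", "NVENC"),
--         ("hevc_qsv", "Intel QSV"),
--         ("hevc_amf", "AMD AMF"),
--         ("hevc_videotoolbox", "VideoToolbox"),
--         ("hevc_vaapi", "VAAPI"),
--         ("hevc_v4l2m2m", "V4L2 M2M"),
--     ],
--     "av1": [
--         ("av1_nvenc", "NVENC"),
--         ("av1_qsv", "Intel QSV"),
--         ("av1_amf", "AMD AMF"),
--         ("av1_videotoolbox", "VideoToolbox"),
--         ("av1_vaapi", "VAAPI"),
--         ("av1_v4l2m2m", "V4L2 M2M"),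
--     ],
--     "vp9": [
--         ("vp9_qsv", "Intel QSV"),
--         ("vp9_vaapi", "VAAPI"),
--         ("vp9_v4l2m2m", "V4L2 M2M"),
--     ],
-- }
--
-- SOFTWARE_ENCODERS_ORDER: Dict[str, List[str]] = {
--     "h264": ["libx264", "libopenh264"],
--     "hevc": ["libx265"],
--     "av1": ["libsvtav1", "libaom-av1"],
--     "vp9": ["libvpx-vp9"],
-- }
--
-- def _infer_family_for_encoder(encoder: str) -> Optional[str]:
--     e = encoder.lower()
--     # Check software lists
--     for family, sw_list in SOFTWARE_ENCODERS_ORDER.items():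
--         if encoder in sw_list:
--             return family
--     # Check hardware lists
--     for family, hw_list in HARDWARE_ENCODERS.items():
--         for enc, _label in hw_list:
--             if enc == encoder:
--                 return family
--     # Fallback by substring
--     for family in ["h264", "hevc", "av1", "vp9"]:
--         if family in e:
--             return family
--     return None
-- ===== SOURCE B (Python) =====
-- from typing import Optional
--
-- # Every encoder name in the project's tables except libx264/libx265 already contains its
-- # family as a substring of its lowercase form, so the tables reduce to two special cases
-- # plus the substring scan.
-- def _infer_family_for_encoder(encoder: str) -> Optional[str]:
--     if encoder == "libx264":
--         return "h264"
--     if encoder == "libx265":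
--         return "hevc"
--     e = encoder.lower()
--     for family in ("h264", "hevc", "av1", "vp9"):
--         if family in e:
--             return family
--     return None
-- ===== Notes on version B (the rewrite author's own statement) =====
-- stated objective: simpler
-- what changed: Drops both encoder tables entirely: every table name except libx264/libx265 already contains its family as a lowercase substring, so B is two equality checks plus the same substring scan, with no table traversal at all.
import Mathlib
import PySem

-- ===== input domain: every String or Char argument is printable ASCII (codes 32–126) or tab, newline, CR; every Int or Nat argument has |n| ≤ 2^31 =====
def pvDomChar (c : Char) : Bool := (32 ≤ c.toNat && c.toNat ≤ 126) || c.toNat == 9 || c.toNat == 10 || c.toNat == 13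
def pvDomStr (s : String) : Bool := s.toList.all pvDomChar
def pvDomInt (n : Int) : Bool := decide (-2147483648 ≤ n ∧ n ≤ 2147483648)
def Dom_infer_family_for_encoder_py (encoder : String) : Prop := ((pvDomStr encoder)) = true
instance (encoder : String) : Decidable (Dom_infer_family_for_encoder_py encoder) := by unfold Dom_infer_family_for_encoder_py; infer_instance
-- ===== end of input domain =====

-- B removes both encoder tables: apart from libx264/libx265 every table name already contains
-- its family as a lowercase substring, so two equality checks plus the substring scan suffice (objective: simpler).

-- ===== PORT A =====
-- the module constants (insertion-ordered dicts as association lists)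
def swEncoders : List (String × List String) :=
  [("h264", ["libx264", "libopenh264"]),
   ("hevc", ["libx265"]),
   ("av1", ["libsvtav1", "libaom-av1"]),
   ("vp9", ["libvpx-vp9"])]

def hwEncoders : List (String × List (String × String)) :=
  [("h264", [("h264_nvenc", "NVENC"), ("h264_qsv", "Intel QSV"), ("h264_amf", "AMD AMF"),
             ("h264_videotoolbox", "VideoToolbox"), ("h264_vaapi", "VAAPI"),
             ("h264_v4l2m2m", "V4L2 M2M"), ("h264_omx", "OMX")]),
   ("hevc", [("hevc_nvenc", "NVENC"), ("hevc_qsv", "Intel QSV"), ("hevc_amf", "AMD AMF"),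
             ("hevc_videotoolbox", "VideoToolbox"), ("hevc_vaapi", "VAAPI"),
             ("hevc_v4l2m2m", "V4L2 M2M")]),
   ("av1", [("av1_nvenc", "NVENC"), ("av1_qsv", "Intel QSV"), ("av1_amf", "AMD AMF"),
            ("av1_videotoolbox", "VideoToolbox"), ("av1_vaapi", "VAAPI"),
            ("av1_v4l2m2m", "V4L2 M2M")]),
   ("vp9", [("vp9_qsv", "Intel QSV"), ("vp9_vaapi", "VAAPI"), ("vp9_v4l2m2m", "V4L2 M2M")])]

-- A: scan software lists, then hardware lists, then substring fallback
def infer_family_for_encoder_py (encoder : String) : Option String :=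
  let e := PySem.Str.lower encoder
  match swEncoders.find? (fun p => p.2.contains encoder) with
  | some p => some p.1
  | none =>
    match hwEncoders.find? (fun p => p.2.any (fun q => q.1 == encoder)) with
    | some p => some p.1
    | none =>
      match (["h264", "hevc", "av1", "vp9"] : List String).find?
              (fun family => PySem.Str.isIn family e) with
      | some family => some family
      | none => none

-- ===== PORT B =====
def infer_family_for_encoder_py_alt (encoder : String) : Option String :=
  if encoder == "libx264" then some "h264"
  else if encoder == "libx265" then some "hevc"
  else
    let e := PySem.Str.lower encoder
    match (["h264", "hevc", "av1", "vp9"] : List String).find?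
            (fun family => PySem.Str.isIn family e) with
    | some family => some family
    | none => none

-- ===== PRECONDITION & SPEC =====
def Spec_infer_family_for_encoder_py (encoder : String) (out : Option String) : Prop := out = infer_family_for_encoder_py_alt encoder
instance (encoder : String) (out : Option String) : Decidable (Spec_infer_family_for_encoder_py encoder out) := by unfold Spec_infer_family_for_encoder_py; infer_instance

-- ===== CLAIM (what is proved, stated in full; the proofs are below) =====
def Claim_equal_infer_family_for_encoder_py : Prop := ∀ (encoder : String), Dom_infer_family_for_encoder_py encoder → Spec_infer_family_for_encoder_py encoder (infer_family_for_encoder_py encoder)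

-- ===== LEMMAS AND PROOFS =====
-- all 28 exact encoder names appearing in A's tables
def encNames : List String :=
  ["libx264", "libopenh264", "libx265", "libsvtav1", "libaom-av1", "libvpx-vp9",
   "h264_nvenc", "h264_qsv", "h264_amf", "h264_videotoolbox", "h264_vaapi",
   "h264_v4l2m2m", "h264_omx",
   "hevc_nvenc", "hevc_qsv", "hevc_amf", "hevc_videotoolbox", "hevc_vaapi", "hevc_v4l2m2m",
   "av1_nvenc", "av1_qsv", "av1_amf", "av1_videotoolbox", "av1_vaapi", "av1_v4l2m2m",
   "vp9_qsv", "vp9_vaapi", "vp9_v4l2m2m"]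

lemma sw_none_of_not_mem (encoder : String) (h : encoder ∉ encNames) :
    swEncoders.find? (fun p => p.2.contains encoder) = none := by
  rw [List.find?_eq_none]
  intro p hp
  simp only [encNames, List.mem_cons, not_or] at h
  fin_cases hp <;>
    simp only [List.contains_cons, List.contains_nil, Bool.or_eq_true, beq_iff_eq,
      Bool.false_eq_true, or_false] <;>
    rintro (rfl | rfl) <;> simp_all

lemma hw_none_of_not_mem (encoder : String) (h : encoder ∉ encNames) :
    hwEncoders.find? (fun p => p.2.any (fun q => q.1 == encoder)) = none := by
  rw [List.find?_eq_none]
  intro p hp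
  simp only [encNames, List.mem_cons, not_or] at h
  fin_cases hp <;>
    simp only [List.any_cons, List.any_nil, Bool.or_eq_true, beq_iff_eq,
      Bool.false_eq_true, or_false] <;>
    (first
      | rintro (rfl | rfl | rfl)
      | rintro (rfl | rfl | rfl | rfl | rfl | rfl)
      | rintro (rfl | rfl | rfl | rfl | rfl | rfl | rfl)) <;> simp_all

-- ===== VERDICT (by name: the statement is the Claim_ definition above) =====
theorem infer_family_for_encoder_py_spec : Claim_equal_infer_family_for_encoder_py := by
  intro encoder _
  show infer_family_for_encoder_py encoder = infer_family_for_encoder_py_alt encoder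
  by_cases h : encoder ∈ encNames
  · simp only [encNames, List.mem_cons, List.not_mem_nil, or_false] at h
    rcases h with h | h | h | h | h | h | h | h | h | h | h | h | h | h |
      h | h | h | h | h | h | h | h | h | h | h | h | h | h <;> subst h <;> decide
  · have h1 : (encoder == "libx264") = false := by
      simp only [beq_eq_false_iff_ne, ne_eq]
      intro he; exact h (by rw [he]; decide)
    have h2 : (encoder == "libx265") = false := by
      simp only [beq_eq_false_iff_ne, ne_eq]
      intro he; exact h (by rw [he]; decide)
    rw [infer_family_for_encoder_py, infer_family_for_encoder_py_alt,
        sw_none_of_not_mem encoder h, hw_none_of_not_mem encoder h, h1]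
    simp only [Bool.false_eq_true, if_false, h2]
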